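-- pv_equiv track=rewrite | github.com/bmmtstb/adventofcode | 2020/Day20.py | rotate_tile
-- ===== SOURCE A (Python) =====
-- from copy import deepcopy
-- from typing import Dict, List, Tuple, Set
--
-- def rotate_tile(op: str, tile: List[str]):
--     """
--     rotate or mirror the given tile
--     values for operation
--     h: left becomes right
--     v: top becomes bottom
--     r180: rotate 180° (same as h+v)
--     r90: rotate 90° clockwise
--     r270: rotate 270° clockwise
--     """
--     data = deepcopy(tile)
--     if op == "r180" or op == "v":
--         data = data[::-1]
--     if op == "r180" or op == "h":
--         data = [d[::-1] for d in data]
--     if op == "r90":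
--         data = ["".join(data[len(data) - 1 - j][i] for j in range(len(data))) for i in range(len(data[0]))]
--     elif op == "r270":
--         data = ["".join(data[j][len(data[0]) - 1 - i] for j in range(len(data))) for i in range(len(data[0]))]
--     return data
-- ===== SOURCE B (Python) =====
-- def _rot90(grid):
--     """One clockwise quarter-turn, computed recursively: peel the leftmost
--     column (read bottom-up) as the next output row, then recurse on the rows
--     minus their first character."""
--     if not grid or any(not r for r in grid):
--         return []
--     return ["".join(r[0] for r in reversed(grid))] + _rot90([r[1:] for r in grid])
--
-- def rotate_tile(op, tile):
--     """rotate or mirror the given tile; rotations are iterated quarter-turns."""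
--     if op == "r90" or op == "r270":
--         out = tile
--         for _ in range(1 if op == "r90" else 3):
--             out = _rot90(out)
--         return out
--     if op == "r180":
--         return [r[::-1] for r in reversed(tile)]
--     if op == "h":
--         return [r[::-1] for r in tile]
--     if op == "v":
--         return list(reversed(tile))
--     return list(tile)
-- ===== Notes on version B (the rewrite author's own statement) =====
-- stated objective: alternative
-- what changed: Replaces A's two nested index-arithmetic comprehensions (data[len-1-j][i], data[j][len-1-i]) by a single recursive quarter-turn primitive that peels the leftmost column bottom-up; r90 is one application and r270 is that primitive iterated three times, while the mirrors stay whole-row reversals.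
import Mathlib
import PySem

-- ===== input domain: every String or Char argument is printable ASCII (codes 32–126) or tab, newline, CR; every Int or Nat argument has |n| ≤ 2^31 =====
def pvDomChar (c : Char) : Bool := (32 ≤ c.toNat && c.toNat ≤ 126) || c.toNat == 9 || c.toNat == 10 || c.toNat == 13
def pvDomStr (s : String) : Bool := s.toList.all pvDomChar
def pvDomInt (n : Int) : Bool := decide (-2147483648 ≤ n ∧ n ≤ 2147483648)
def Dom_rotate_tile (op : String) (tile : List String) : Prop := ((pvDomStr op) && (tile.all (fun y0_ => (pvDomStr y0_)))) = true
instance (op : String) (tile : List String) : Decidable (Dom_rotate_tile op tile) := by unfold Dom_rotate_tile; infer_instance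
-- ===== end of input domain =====

-- B replaces A's nested index-arithmetic comprehensions by ONE recursive quarter-turn
-- primitive (peel the leftmost column bottom-up) iterated one or three times
-- (objective: alternative decomposition; same asymptotic cost).

-- ===== PORT A =====
-- data[j][i] with a default: total form of the double indexing; Pre_ keeps both indices in range.
def pvTileChar (data : List String) (j i : Int) : Char :=
  (PySem.Str.pyGet? (PySem.List.pyGetD data j "") i).getD ' '

def rotate_tile (op : String) (tile : List String) : List String :=
  let data := tile
  let data := if op = "r180" ∨ op = "v" then (PySem.List.slice? data none none (-1)).getD [] else data
  let data := if op = "r180" ∨ op = "h" then data.map (fun d => (PySem.Str.slice? d none none (-1)).getD "") else data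
  if op = "r90" then
    (PySem.List.pyRange 0 (PySem.Str.len (PySem.List.pyGetD data 0 "")) 1).map (fun i =>
      String.ofList ((PySem.List.pyRange 0 (PySem.List.len data) 1).map (fun j =>
        pvTileChar data (PySem.List.len data - 1 - j) i)))
  else if op = "r270" then
    (PySem.List.pyRange 0 (PySem.Str.len (PySem.List.pyGetD data 0 "")) 1).map (fun i =>
      String.ofList ((PySem.List.pyRange 0 (PySem.List.len data) 1).map (fun j =>
        pvTileChar data j (PySem.Str.len (PySem.List.pyGetD data 0 "") - 1 - i))))
  else data

-- ===== PORT B =====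
-- needed by pvRot90's decreasing_by
lemma pvSumLenTail_le (rs : List (List Char)) :
    ((rs.map List.tail).map List.length).sum ≤ (rs.map List.length).sum := by
  induction rs with
  | nil => simp
  | cons a t ih =>
    simp only [List.map_cons, List.sum_cons]
    have : a.tail.length ≤ a.length := by cases a <;> simp
    omega

-- _rot90: one clockwise quarter-turn, recursive — peel the leftmost column bottom-up
def pvRot90 (grid : List (List Char)) : List (List Char) :=
  if h : grid ≠ [] ∧ ∀ r ∈ grid, r ≠ [] then
    grid.reverse.map List.headI :: pvRot90 (grid.map List.tail)
  else []
termination_by (grid.map List.length).sum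
decreasing_by
  simp only [List.map_subtype, List.unattach_attach]
  rcases grid with _ | ⟨a, t⟩
  · exact absurd rfl h.1
  · have ha : a ≠ [] := h.2 a (by simp)
    have h1 : a.tail.length < a.length := by cases a <;> simp_all
    have h2 := pvSumLenTail_le t
    simp only [List.map_cons, List.sum_cons]
    omega

-- the 'for _ in range(turns): out = _rot90(out)' loop
def pvRotN : Nat → List (List Char) → List (List Char)
  | 0, g => g
  | n + 1, g => pvRotN n (pvRot90 g)

def rotate_tile_alt (op : String) (tile : List String) : List String :=
  if op = "r90" ∨ op = "r270" then
    (pvRotN (if op = "r90" then 1 else 3) (tile.map String.toList)).map String.ofList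
  else if op = "r180" then tile.reverse.map (fun r => String.ofList r.toList.reverse)
  else if op = "h" then tile.map (fun r => String.ofList r.toList.reverse)
  else if op = "v" then tile.reverse
  else tile

-- ===== PRECONDITION & SPEC =====
-- Pre_ excludes exactly the inputs on which A raises IndexError: op "r90"/"r270" with an
-- empty tile or with some row shorter than the first row (A indexes every row at the
-- first row's width).
def Pre_rotate_tile (op : String) (tile : List String) : Prop :=
  (op = "r90" ∨ op = "r270") →
    (tile ≠ [] ∧ ∀ r ∈ tile, tile.headI.toList.length ≤ r.toList.length)
instance (op : String) (tile : List String) : Decidable (Pre_rotate_tile op tile) := by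
  unfold Pre_rotate_tile; infer_instance

def pvWitness_rotate_tile : String × List String := ("r90", ["ab", "cd"])

def Spec_rotate_tile (op : String) (tile : List String) (out : List String) : Prop := out = rotate_tile_alt op tile
instance (op : String) (tile : List String) (out : List String) : Decidable (Spec_rotate_tile op tile out) := by unfold Spec_rotate_tile; infer_instance

-- ===== CLAIM (what is proved, stated in full; the proofs are below) =====
def Claim_equal_rotate_tile : Prop := ∀ (op : String) (tile : List String), Dom_rotate_tile op tile → Pre_rotate_tile op tile → Spec_rotate_tile op tile (rotate_tile op tile)

-- ===== LEMMAS AND PROOFS =====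

lemma getD_succ_tail {α : Type} [Inhabited α] (r : List α) (i : Nat) (d : α) :
    r.getD (i + 1) d = r.tail.getD i d := by
  cases r <;> simp [List.getD]

-- pvRot90 on a grid whose rows all have length ≥ w, one of them exactly w,
-- is the w-column bottom-up transpose
lemma pvRot90_eq_cols (w : Nat) (grid : List (List Char))
    (hne : grid ≠ []) (hall : ∀ r ∈ grid, w ≤ r.length) (hex : ∃ r ∈ grid, r.length = w) :
    pvRot90 grid = (List.range w).map (fun i => grid.reverse.map (fun r => r.getD i ' ')) := by
  induction w generalizing grid with
  | zero =>
    obtain ⟨r, hr, hrw⟩ := hex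
    rw [pvRot90, dif_neg]
    · simp
    · rintro ⟨-, h2⟩
      exact h2 r hr (List.eq_nil_of_length_eq_zero hrw)
  | succ w ih =>
    have hne' : ∀ r ∈ grid, r ≠ [] := by
      intro r hr e
      have := hall r hr; rw [e] at this; simp at this
    rw [pvRot90, dif_pos ⟨hne, hne'⟩, List.range_succ_eq_map]
    simp only [List.map_cons, List.map_map]
    congr 1
    · refine List.map_congr_left (fun r hr => ?_)
      rcases r with _ | ⟨a, t⟩
      · exact absurd rfl (hne' _ (List.mem_reverse.mp hr))
      · rfl
    · rw [ih (grid.map List.tail) (by simpa using hne)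
        (by rintro r' hr'
            obtain ⟨r, hr, rfl⟩ := List.mem_map.mp hr'
            have := hall r hr
            cases r <;> simp_all)
        (by obtain ⟨r, hr, hrw⟩ := hex
            exact ⟨r.tail, List.mem_map_of_mem hr, by cases r <;> simp_all⟩)]
      rw [← List.map_reverse]
      refine List.map_congr_left (fun i _ => ?_)
      simp only [Function.comp, List.map_map]
      refine List.map_congr_left (fun r _ => ?_)
      exact (getD_succ_tail r i ' ').symm

-- the double indexing, with both indices in range, reads the character at [k][i]
lemma pvTileChar_eq (tile : List String) (k : Int) (i : Nat) (hk0 : 0 ≤ k)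
    (hk : k.toNat < tile.length) :
    pvTileChar tile k i = (tile[k.toNat]).toList.getD i ' ' := by
  unfold pvTileChar
  rw [PySem.List.pyGetD_eq_getElem tile "" hk0 (by omega)]
  rw [show PySem.Str.pyGet? tile[k.toNat] (i : Int) = PySem.Chars.pyGet? (tile[k.toNat]).toList (i : Int) from rfl]
  rw [PySem.Chars.pyGet?_eq_listPyGet?, PySem.List.pyGet?_natCast]
  exact (List.getD_eq_getElem?_getD).symm

lemma headI_mem {α : Type} [Inhabited α] (l : List α) (h : l ≠ []) : l.headI ∈ l := by
  cases l
  · exact absurd rfl h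
  · simp

lemma pyGetD_zero_headI (tile : List String) (h : tile ≠ []) :
    PySem.List.pyGetD tile 0 "" = tile.headI := by
  rcases tile with _ | ⟨a, t⟩
  · exact absurd rfl h
  · rw [show (0 : Int) = ((0 : Nat) : Int) from rfl, PySem.List.pyGetD_natCast]
    rfl

lemma r90_eq (tile : List String) (hne : tile ≠ [])
    (hall : ∀ r ∈ tile, tile.headI.toList.length ≤ r.toList.length) :
    rotate_tile "r90" tile = rotate_tile_alt "r90" tile := by
  have hzip : pvRot90 (tile.map String.toList)
      = (List.range tile.headI.toList.length).map
          (fun i => (tile.map String.toList).reverse.map (fun r => r.getD i ' ')) := by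
    refine pvRot90_eq_cols _ _ (by simpa using hne) ?_ ?_
    · intro r hr
      obtain ⟨s, hs, rfl⟩ := List.mem_map.mp hr
      exact hall s hs
    · exact ⟨tile.headI.toList, List.mem_map_of_mem (headI_mem tile hne), rfl⟩
  unfold rotate_tile rotate_tile_alt pvRotN pvRotN
  simp only [String.reduceEq, or_self, or_false, or_true, if_true, if_false]
  rw [pyGetD_zero_headI tile hne, PySem.Str.len_eq, PySem.List.len_eq,
      PySem.List.pyRange_zero_natCast, PySem.List.pyRange_zero_natCast, hzip]
  simp only [List.map_map]
  refine List.map_congr_left (fun i _ => ?_)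
  simp only [Function.comp]
  congr 1
  apply List.ext_getElem
  · simp
  · intro j h1 h2
    simp only [List.getElem_map, List.getElem_range, List.getElem_reverse, Function.comp_apply]
    rw [show ((tile.length : Int) - 1 - (j : Int)) = (((tile.length - 1 - j : Nat)) : Int) by
      simp at h1; omega]
    rw [pvTileChar_eq tile _ i (by positivity) (by simp at h1 ⊢; omega)]
    simp at h1 ⊢

lemma r270_eq (tile : List String) (hne : tile ≠ [])
    (hall : ∀ r ∈ tile, tile.headI.toList.length ≤ r.toList.length) :
    rotate_tile "r270" tile = rotate_tile_alt "r270" tile := by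
  set w := tile.headI.toList.length with hw
  set T := tile.map String.toList with hT
  set H := tile.length with hH
  have hHpos : 0 < H := by rw [hH]; exact List.length_pos_iff.mpr hne
  have hTne : T ≠ [] := by simpa [hT] using hne
  have hlenT : T.length = H := by simp [hT, hH]
  have hG1 : pvRot90 T
      = (List.range w).map (fun i => T.reverse.map (fun r => r.getD i ' ')) := by
    refine pvRot90_eq_cols _ _ hTne ?_ ?_
    · intro r hr
      obtain ⟨s, hs, rfl⟩ := List.mem_map.mp hr
      exact hall s hs
    · exact ⟨tile.headI.toList, List.mem_map_of_mem (headI_mem tile hne), rfl⟩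
  by_cases hw0 : w = 0
  · -- degenerate: first row empty; every stage and A's output are []
    have e1 : pvRot90 T = [] := by rw [hG1, hw0]; simp
    have e0 : pvRot90 ([] : List (List Char)) = [] := by
      rw [pvRot90, dif_neg (by simp)]
    have e3 : pvRot90 (pvRot90 (pvRot90 T)) = [] := by rw [e1, e0, e0]
    unfold rotate_tile rotate_tile_alt
    simp only [pvRotN, String.reduceEq, or_self, or_false, or_true, if_true, if_false]
    rw [pyGetD_zero_headI tile hne, PySem.Str.len_eq, ← hw, hw0, ← hT, e3]
    simp [PySem.List.pyRange]
  · have hwpos : 0 < w := Nat.pos_of_ne_zero hw0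
    have hG2 : pvRot90 (pvRot90 T)
        = (List.range H).map (fun j =>
            ((List.range w).map (fun i => T.reverse.map (fun r => r.getD i ' '))).reverse.map
              (fun r => r.getD j ' ')) := by
      rw [hG1]
      refine pvRot90_eq_cols _ _ (by simp; omega) ?_ ?_
      · intro r hr
        obtain ⟨i, -, rfl⟩ := List.mem_map.mp hr
        simp [hlenT]
      · refine ⟨T.reverse.map (fun r => r.getD 0 ' '), ?_, by simp [hlenT]⟩
        exact List.mem_map_of_mem (by simp; omega)
    have hG3 : pvRot90 (pvRot90 (pvRot90 T))
        = (List.range w).map (fun i =>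
            ((List.range H).map (fun j =>
              ((List.range w).map (fun i => T.reverse.map (fun r => r.getD i ' '))).reverse.map
                (fun r => r.getD j ' '))).reverse.map (fun r => r.getD i ' ')) := by
      rw [hG2]
      refine pvRot90_eq_cols _ _ (by simp; omega) ?_ ?_
      · intro r hr
        obtain ⟨j, -, rfl⟩ := List.mem_map.mp hr
        simp
      · refine ⟨_, List.mem_map_of_mem (show 0 ∈ List.range H by simp; omega), by simp⟩
    unfold rotate_tile rotate_tile_alt
    simp only [pvRotN, String.reduceEq, or_self, or_false, or_true, if_true, if_false]
    rw [pyGetD_zero_headI tile hne, PySem.Str.len_eq, PySem.List.len_eq, ← hw, ← hH,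
        PySem.List.pyRange_zero_natCast, PySem.List.pyRange_zero_natCast, ← hT, hG3]
    simp only [List.map_map]
    refine List.map_congr_left (fun i hi => ?_)
    have hiw : i < w := List.mem_range.mp hi
    simp only [Function.comp]
    congr 1
    apply List.ext_getElem
    · simp
    · intro j h1 h2
      have hjH : j < H := by simpa using h1
      simp only [List.getElem_map, List.getElem_reverse, List.getElem_range,
                 List.length_map, List.length_range, List.length_reverse,
                 Function.comp_apply]
      rw [List.getD_eq_getElem _ ' ' (by simp; omega)]
      simp only [List.getElem_map, List.getElem_reverse, List.getElem_range,
                 List.length_map, List.length_range, List.length_reverse]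
      rw [List.getD_eq_getElem _ ' ' (by simp [hlenT]; omega)]
      simp only [List.getElem_map, List.getElem_reverse]
      rw [show ((w : Int) - 1 - (i : Int)) = (((w - 1 - i : Nat)) : Int) by omega]
      rw [pvTileChar_eq tile _ _ (by positivity) (by simp at h2 ⊢; omega)]
      simp only [Int.toNat_natCast, hT, List.getElem_map, List.length_map]
      have hjj : tile.length - 1 - (H - 1 - j) = j := by rw [← hH]; omega
      simp only [hjj]

-- ===== VERDICT (by name: the statement is the Claim_ definition above) =====
theorem rotate_tile_spec : Claim_equal_rotate_tile := by
  intro op tile _ hpre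
  show rotate_tile op tile = rotate_tile_alt op tile
  by_cases h90 : op = "r90"
  · subst h90
    obtain ⟨h1, h2⟩ := hpre (Or.inl rfl)
    exact r90_eq tile h1 h2
  by_cases h270 : op = "r270"
  · subst h270
    obtain ⟨h1, h2⟩ := hpre (Or.inr rfl)
    exact r270_eq tile h1 h2
  by_cases h180 : op = "r180"
  · subst h180
    unfold rotate_tile rotate_tile_alt
    simp only [String.reduceEq, or_self, or_false, if_true, if_false,
               PySem.List.slice?_none_none_neg_one]
    simp [PySem.Str.slice?_none_none_neg_one]
  by_cases hh : op = "h"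
  · subst hh
    unfold rotate_tile rotate_tile_alt
    simp only [String.reduceEq, or_self, or_false, if_true, if_false]
    simp [PySem.Str.slice?_none_none_neg_one]
  by_cases hv : op = "v"
  · subst hv
    unfold rotate_tile rotate_tile_alt
    simp only [String.reduceEq, or_self, or_false, if_true, if_false,
               PySem.List.slice?_none_none_neg_one]
    rfl
  · unfold rotate_tile rotate_tile_alt
    simp only [if_neg h90, if_neg h270, if_neg h180, if_neg hh, if_neg hv,
               if_neg (show ¬(op = "r90" ∨ op = "r270") from fun h => h.elim h90 h270),
               if_neg (show ¬(op = "r180" ∨ op = "v") from fun h => h.elim h180 hv),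
               if_neg (show ¬(op = "r180" ∨ op = "h") from fun h => h.elim h180 hh)]
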